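-- pv_equiv track=rewrite | github.com/uynNee/Enhancing-Personal-Style | my_project/Enhancing Personal Style/utils/recommend_init.py | group_recommendations_by_subcategory
-- ===== SOURCE A (Python) =====
-- from collections import OrderedDict
--
-- def group_recommendations_by_subcategory(recommendations):
--     ordered_subcategories = ['Topwear', 'Bottomwear', 'Dress']
--     grouped_recommendations = OrderedDict((subcategory, []) for subcategory in ordered_subcategories)
--     for product in recommendations:
--         subcategory = product['subCategory']
--         if subcategory in grouped_recommendations:
--             grouped_recommendations[subcategory].append(product)
--
--     return {subcategory: products for subcategory, products in grouped_recommendations.items() if products}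
-- ===== SOURCE B (Python) =====
-- def group_recommendations_by_subcategory(recommendations):
--     recs = list(recommendations)
--     result = {}
--     for sub in ('Topwear', 'Bottomwear', 'Dress'):
--         items = [p for p in recs if p['subCategory'] == sub]
--         if items:
--             result[sub] = items
--     return result
-- ===== Notes on version B (the rewrite author's own statement) =====
-- stated objective: simpler
-- what changed: Replaces A's pre-seeded OrderedDict dispatch pass (append into per-key buckets, then a filtering dict comprehension) with one filtering comprehension per fixed subcategory, inserted only when non-empty.
import Mathlib
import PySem

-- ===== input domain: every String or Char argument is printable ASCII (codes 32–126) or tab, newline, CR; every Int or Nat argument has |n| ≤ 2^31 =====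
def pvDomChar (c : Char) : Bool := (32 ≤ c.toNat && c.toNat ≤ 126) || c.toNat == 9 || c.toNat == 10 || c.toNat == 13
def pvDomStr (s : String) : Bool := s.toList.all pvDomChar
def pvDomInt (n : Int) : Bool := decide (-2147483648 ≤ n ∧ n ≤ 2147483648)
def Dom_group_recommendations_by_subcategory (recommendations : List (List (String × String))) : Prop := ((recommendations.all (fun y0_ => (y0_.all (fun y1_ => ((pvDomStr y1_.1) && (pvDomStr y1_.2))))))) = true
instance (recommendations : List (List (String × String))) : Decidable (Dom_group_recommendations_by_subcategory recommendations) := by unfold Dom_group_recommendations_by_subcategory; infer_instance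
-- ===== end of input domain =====

-- B replaces A's single pre-seeded-OrderedDict dispatch pass by one filtering scan per
-- fixed subcategory, inserted only when non-empty (objective: simpler).

-- ===== PORT A =====

-- product['subCategory']: first-match lookup in the association list (none = KeyError)
def pvGetSub (p : List (String × String)) : Option String :=
  (p.find? (fun e => e.1 == "subCategory")).map (·.2)

-- grouped_recommendations[subcategory].append(product)
def pvAppendAt (g : List (String × List (List (String × String)))) (k : String)
    (p : List (String × String)) : List (String × List (List (String × String))) :=
  g.map (fun e => if e.1 == k then (e.1, e.2 ++ [p]) else e)

-- the body of A's 'for product in recommendations' loop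
def pvStepA (g : List (String × List (List (String × String))))
    (p : List (String × String)) : List (String × List (List (String × String))) :=
  match pvGetSub p with
  | none => g          -- KeyError in Python; excluded by Pre_
  | some s => if (g.map (·.1)).contains s then pvAppendAt g s p else g

def group_recommendations_by_subcategory (recommendations : List (List (String × String))) : List (String × List (List (String × String))) :=
  let grouped := recommendations.foldl pvStepA
    [("Topwear", []), ("Bottomwear", []), ("Dress", [])]
  grouped.filter (fun e => !e.2.isEmpty)

-- ===== PORT B =====

def group_recommendations_by_subcategory_alt (recommendations : List (List (String × String))) : List (String × List (List (String × String))) :=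
  ["Topwear", "Bottomwear", "Dress"].foldl
    (fun res s =>
      let items := recommendations.filter (fun p => pvGetSub p == some s)
      if items.isEmpty then res else res ++ [(s, items)])
    []

-- ===== PRECONDITION & SPEC =====
-- Pre_ excludes exactly the inputs where some product lacks the 'subCategory' key,
-- on which Python A (and B) raise KeyError.
def Pre_group_recommendations_by_subcategory (recommendations : List (List (String × String))) : Prop :=
  ∀ p ∈ recommendations, (p.map (·.1)).contains "subCategory" = true
instance (recommendations : List (List (String × String))) : Decidable (Pre_group_recommendations_by_subcategory recommendations) := by unfold Pre_group_recommendations_by_subcategory; infer_instance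

def pvWitness_group_recommendations_by_subcategory : (List (List (String × String))) :=
  [[("subCategory", "Topwear"), ("id", "1")], [("subCategory", "Shoes")]]

def Spec_group_recommendations_by_subcategory (recommendations : List (List (String × String))) (out : List (String × List (List (String × String)))) : Prop := out = group_recommendations_by_subcategory_alt recommendations
instance (recommendations : List (List (String × String))) (out : List (String × List (List (String × String)))) : Decidable (Spec_group_recommendations_by_subcategory recommendations out) := by unfold Spec_group_recommendations_by_subcategory; infer_instance

-- ===== CLAIM (what is proved, stated in full; the proofs are below) =====
def Claim_equal_group_recommendations_by_subcategory : Prop := ∀ (recommendations : List (List (String × String))), Dom_group_recommendations_by_subcategory recommendations → Pre_group_recommendations_by_subcategory recommendations → Spec_group_recommendations_by_subcategory recommendations (group_recommendations_by_subcategory recommendations)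

-- ===== LEMMAS AND PROOFS =====

-- A's fold over the fixed three-key table equals per-key filters appended to the accumulator
theorem foldA_inv (recs : List (List (String × String)))
    (a b c : List (List (String × String))) :
    recs.foldl pvStepA [("Topwear", a), ("Bottomwear", b), ("Dress", c)] =
      [("Topwear", a ++ recs.filter (fun p => pvGetSub p == some "Topwear")),
       ("Bottomwear", b ++ recs.filter (fun p => pvGetSub p == some "Bottomwear")),
       ("Dress", c ++ recs.filter (fun p => pvGetSub p == some "Dress"))] := by
  induction recs generalizing a b c with
  | nil => simp
  | cons p recs ih =>
    simp only [List.foldl_cons, List.filter_cons]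
    rcases h : pvGetSub p with _ | s
    · simp [pvStepA, h, ih]
    · by_cases h1 : s = "Topwear"
      · subst h1; simp [pvStepA, h, pvAppendAt, ih]
      · by_cases h2 : s = "Bottomwear"
        · subst h2; simp [pvStepA, h, pvAppendAt, ih]
        · by_cases h3 : s = "Dress"
          · subst h3; simp [pvStepA, h, pvAppendAt, ih]
          · simp [pvStepA, h, ih, h1, h2, h3]

theorem group_recommendations_by_subcategory_spec : Claim_equal_group_recommendations_by_subcategory := by
  intro recs _hdom _hpre
  unfold Spec_group_recommendations_by_subcategory
  unfold group_recommendations_by_subcategory group_recommendations_by_subcategory_alt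
  rw [foldA_inv]
  simp only [List.nil_append, List.foldl_cons, List.foldl_nil]
  split_ifs <;>
    simp_all [List.filter_nil]
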